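-- pv_equiv track=rewrite | github.com/maiquangminh-work/KLTN_MaiQuangMinh | api.py | _dem_trong_so
-- ===== SOURCE A (Python) =====
-- def _dem_trong_so(text, keyword_weights):
--     score = 0
--     matched_keywords = []
--     for keyword, weight in keyword_weights.items():
--         if keyword in text:
--             score += weight
--             matched_keywords.append(keyword)
--     return score, matched_keywords
-- ===== SOURCE B (Python) =====
-- def _dem_trong_so(text, keyword_weights):
--     # Text-driven matching: instead of scanning the text once per keyword,
--     # scan the text positions once and look each window up in a hash set of
--     # keywords (one window per distinct keyword length per position).
--     kw_set = set(keyword_weights)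
--     lengths = sorted({len(k) for k in keyword_weights})
--     found = set()
--     for i in range(len(text) + 1):
--         for L in lengths:
--             piece = text[i:i+L]
--             if piece in kw_set:
--                 found.add(piece)
--     score = 0
--     matched_keywords = []
--     for k, w in keyword_weights.items():
--         if k in found:
--             score += w
--             matched_keywords.append(k)
--     return score, matched_keywords
-- ===== Notes on version B (the rewrite author's own statement) =====
-- stated objective: faster
-- what changed: Matching is inverted from keyword-driven to text-driven: instead of running a substring search over the whole text for every keyword, B slides over every text position once, takes one window per distinct keyword length, and looks the window up in a hash set of keywords; a final pass over the dict keeps score and insertion order.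
import Mathlib
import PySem

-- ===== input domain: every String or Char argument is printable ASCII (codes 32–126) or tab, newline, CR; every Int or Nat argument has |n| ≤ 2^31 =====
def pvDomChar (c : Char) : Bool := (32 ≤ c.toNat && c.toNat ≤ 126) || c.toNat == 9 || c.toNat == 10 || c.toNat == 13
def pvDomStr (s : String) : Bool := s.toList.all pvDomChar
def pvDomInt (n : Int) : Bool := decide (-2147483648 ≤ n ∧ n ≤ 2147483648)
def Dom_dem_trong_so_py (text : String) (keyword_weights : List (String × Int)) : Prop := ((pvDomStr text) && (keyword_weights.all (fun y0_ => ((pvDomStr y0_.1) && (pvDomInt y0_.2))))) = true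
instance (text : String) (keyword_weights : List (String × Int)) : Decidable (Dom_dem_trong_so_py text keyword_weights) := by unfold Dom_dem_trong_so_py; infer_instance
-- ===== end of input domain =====

-- B inverts the matching: a text-driven sliding-window scan (one window per
-- distinct keyword length per text position, looked up in a set of keywords)
-- replaces A's per-keyword substring search; a final pass over the dict keeps
-- score and insertion order.

-- ===== PORT A =====
-- for keyword, weight in keyword_weights.items(): if keyword in text: score += weight; matched.append(keyword)
def dem_trong_so_py (text : String) (keyword_weights : List (String × Int)) : Int × List String :=
  keyword_weights.foldl
    (fun acc p =>
      if PySem.Str.isIn p.1 text then (acc.1 + p.2, acc.2 ++ [p.1]) else acc)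
    (0, [])

-- ===== PORT B =====
-- kw_set = set(keyword_weights); lengths = sorted({len(k) for k in keyword_weights})
-- for i in range(len(text)+1): for L in lengths: piece = text[i:i+L]; if piece in kw_set: found.add(piece)
-- for k, w in keyword_weights.items(): if k in found: score += w; matched_keywords.append(k)
def dem_trong_so_py_alt (text : String) (keyword_weights : List (String × Int)) : Int × List String :=
  let kw_set : PySem.Set String := PySem.Set.ofList (keyword_weights.map Prod.fst)
  let lengths : List Int :=
    PySem.List.sorted
      (PySem.Set.ofList (keyword_weights.map (fun p => (PySem.Str.len p.1 : Int))))
      (fun x => x) false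
  let found : PySem.Set String :=
    (PySem.List.pyRange 0 ((PySem.Str.len text : Int) + 1) 1).foldl
      (fun fnd i =>
        lengths.foldl
          (fun fnd L =>
            let piece := PySem.Str.slice text (some i) (some (i + L))
            if PySem.Set.contains kw_set piece then PySem.Set.add fnd piece else fnd)
          fnd)
      PySem.Set.empty
  keyword_weights.foldl
    (fun acc p =>
      if PySem.Set.contains found p.1 then (acc.1 + p.2, acc.2 ++ [p.1]) else acc)
    (0, [])

-- ===== PRECONDITION & SPEC =====
def Spec_dem_trong_so_py (text : String) (keyword_weights : List (String × Int)) (out : Int × List String) : Prop := out = dem_trong_so_py_alt text keyword_weights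
instance (text : String) (keyword_weights : List (String × Int)) (out : Int × List String) : Decidable (Spec_dem_trong_so_py text keyword_weights out) := by unfold Spec_dem_trong_so_py; infer_instance

-- ===== CLAIM (what is proved, stated in full; the proofs are below) =====
def Claim_equal_dem_trong_so_py : Prop := ∀ (text : String) (keyword_weights : List (String × Int)), Dom_dem_trong_so_py text keyword_weights → Spec_dem_trong_so_py text keyword_weights (dem_trong_so_py text keyword_weights)

-- ===== LEMMAS AND PROOFS =====

-- membership in the inner fold (one text position, all window lengths)
theorem mem_inner_fold (text : String) (kw : PySem.Set String) (ls : List Int) (i : Int)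
    (fnd : PySem.Set String) (x : String) :
    x ∈ ls.foldl
      (fun fnd L =>
        let piece := PySem.Str.slice text (some i) (some (i + L))
        if PySem.Set.contains kw piece then PySem.Set.add fnd piece else fnd)
      fnd
    ↔ x ∈ fnd ∨ ∃ L ∈ ls, PySem.Str.slice text (some i) (some (i + L)) = x ∧ PySem.Set.contains kw x = true := by
  induction ls generalizing fnd with
  | nil => simp
  | cons L t ih =>
    simp only [List.foldl]
    rw [ih]
    by_cases h : PySem.Set.contains kw (PySem.Str.slice text (some i) (some (i + L))) = true
    · simp only [h, if_pos]
      rw [PySem.Set.mem_add]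
      constructor
      · rintro ((hx | rfl) | ⟨L', hL', he, hc⟩)
        · exact Or.inl hx
        · exact Or.inr ⟨L, List.mem_cons_self .., rfl, h⟩
        · exact Or.inr ⟨L', List.mem_cons_of_mem _ hL', he, hc⟩
      · rintro (hx | ⟨L', hL', he, hc⟩)
        · exact Or.inl (Or.inl hx)
        · rcases List.mem_cons.mp hL' with rfl | hL'
          · exact Or.inl (Or.inr he.symm)
          · exact Or.inr ⟨L', hL', he, hc⟩
    · simp only [if_neg h]
      constructor
      · rintro (hx | ⟨L', hL', he, hc⟩)
        · exact Or.inl hx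
        · exact Or.inr ⟨L', List.mem_cons_of_mem _ hL', he, hc⟩
      · rintro (hx | ⟨L', hL', he, hc⟩)
        · exact Or.inl hx
        · rcases List.mem_cons.mp hL' with rfl | hL'
          · exact absurd (he ▸ hc) h
          · exact Or.inr ⟨L', hL', he, hc⟩

-- membership in the outer fold (all text positions)
theorem mem_outer_fold (text : String) (kw : PySem.Set String) (ls : List Int) (is : List Int)
    (fnd : PySem.Set String) (x : String) :
    x ∈ is.foldl
      (fun fnd i =>
        ls.foldl
          (fun fnd L =>
            let piece := PySem.Str.slice text (some i) (some (i + L))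
            if PySem.Set.contains kw piece then PySem.Set.add fnd piece else fnd)
          fnd)
      fnd
    ↔ x ∈ fnd ∨ ∃ i ∈ is, ∃ L ∈ ls, PySem.Str.slice text (some i) (some (i + L)) = x ∧ PySem.Set.contains kw x = true := by
  induction is generalizing fnd with
  | nil => simp
  | cons i t ih =>
    simp only [List.foldl]
    rw [ih, mem_inner_fold]
    constructor
    · rintro ((hx | ⟨L, hL, he, hc⟩) | ⟨i', hi', rest⟩)
      · exact Or.inl hx
      · exact Or.inr ⟨i, List.mem_cons_self .., L, hL, he, hc⟩
      · exact Or.inr ⟨i', List.mem_cons_of_mem _ hi', rest⟩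
    · rintro (hx | ⟨i', hi', rest⟩)
      · exact Or.inl (Or.inl hx)
      · rcases List.mem_cons.mp hi' with rfl | hi'
        · exact Or.inl (Or.inr rest)
        · exact Or.inr ⟨i', hi', rest⟩

-- any window of the text is a substring; a keyword substring appears as a
-- window at some admissible position with its own length
theorem found_contains_iff (text : String) (keyword_weights : List (String × Int))
    (k : String) (hk : k ∈ keyword_weights.map Prod.fst) :
    (k ∈ (PySem.List.pyRange 0 ((PySem.Str.len text : Int) + 1) 1).foldl
      (fun fnd i =>
        (PySem.List.sorted
          (PySem.Set.ofList (keyword_weights.map (fun p => (PySem.Str.len p.1 : Int))))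
          (fun x => x) false).foldl
          (fun fnd L =>
            let piece := PySem.Str.slice text (some i) (some (i + L))
            if PySem.Set.contains (PySem.Set.ofList (keyword_weights.map Prod.fst)) piece
            then PySem.Set.add fnd piece else fnd)
          fnd)
      PySem.Set.empty)
    ↔ PySem.Str.isIn k text = true := by
  rw [mem_outer_fold]
  constructor
  · rintro (h | ⟨i, hi, L, hL, he, -⟩)
    · exact absurd h (List.not_mem_nil)
    · rw [PySem.List.mem_pyRange_one] at hi
      rw [PySem.List.mem_sorted, PySem.Set.mem_ofList, List.mem_map] at hL
      obtain ⟨p, -, rfl⟩ := hL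
      have hL0 : (0:Int) ≤ PySem.Str.len p.1 := by
        rw [PySem.Str.len_eq]; exact Int.natCast_nonneg _
      have he' := congrArg String.toList he
      rw [PySem.Str.toList_slice, PySem.Chars.slice_eq_listSlice,
        PySem.List.slice_toNat _ hi.1 (by omega)] at he'
      rw [PySem.Str.isIn_iff_infix, ← he']
      exact (List.take_prefix _ _).isInfix.trans (List.drop_suffix _ _).isInfix
  · intro hin
    obtain ⟨s1, s2, hst⟩ := (PySem.Str.isIn_iff_infix _ _).mp hin
    have hjle : s1.length ≤ text.toList.length := by
      rw [← hst]; simp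
    refine Or.inr ⟨(s1.length : Int), ?_, PySem.Str.len k, ?_, ?_, ?_⟩
    · rw [PySem.List.mem_pyRange_one, PySem.Str.len_eq]
      constructor
      · exact Int.natCast_nonneg _
      · omega
    · rw [PySem.List.mem_sorted, PySem.Set.mem_ofList, List.mem_map]
      obtain ⟨p, hp, rfl⟩ := List.mem_map.mp hk
      exact ⟨p, hp, rfl⟩
    · rw [← String.toList_inj, PySem.Str.toList_slice, PySem.Chars.slice_eq_listSlice,
        PySem.Str.len_eq, PySem.List.slice_natCast_add]
      have hpre : k.toList <+: text.toList.drop s1.length := by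
        refine ⟨s2, ?_⟩
        rw [← hst, List.append_assoc, List.drop_left]
      rw [List.prefix_iff_eq_take] at hpre
      exact hpre.symm
    · rw [PySem.Set.contains_iff, PySem.Set.mem_ofList]
      exact hk

-- ===== VERDICT (by name: the statement is the Claim_ definition above) =====
theorem dem_trong_so_py_spec : Claim_equal_dem_trong_so_py := by
  intro text kws _
  show dem_trong_so_py text kws = dem_trong_so_py_alt text kws
  unfold dem_trong_so_py dem_trong_so_py_alt
  symm
  apply PySem.List.foldl_congr_mem
  intro acc p hp
  exact if_congr
    (Iff.trans (PySem.Set.contains_iff _ _) (found_contains_iff text kws p.1 (List.mem_map_of_mem hp)))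
    rfl rfl
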